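-- pv_equiv track=rewrite | github.com/tonyyo/- | Python算法指南/274_第k个质数_求质数的新方法_找出非质数.py | kthPrime
-- ===== SOURCE A (Python) =====
-- def kthPrime(n):
--     count = 0
--     prime = [0] * (n + 1)
--
--     for i in range(2, n):  #从4开始, 找出非质数, 剩下的就是质数
--         for j in range(2 * i, n, i):
--             prime[j] = 1
--
--     for i in range(1, n):
--         if prime[i] != 0:
--             count += 1
--     return count
-- ===== SOURCE B (Python) =====
-- def kthPrime(n):
--     if n <= 0:
--         return 0
--     comp = [0] * n
--     i = 2
--     while i * i < n:
--         comp[i * i::i] = [1] * len(range(i * i, n, i))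
--         i += 1
--     return sum(comp)
-- ===== Notes on version B (the rewrite author's own statement) =====
-- stated objective: faster
-- what changed: Replaces A's marking of every multiple of every i < n (plus a final per-element counting loop) by a sieve that only runs divisors up to sqrt(n), starts marking at i*i, writes each stride with one bulk slice assignment, and returns sum(comp).
import Mathlib
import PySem

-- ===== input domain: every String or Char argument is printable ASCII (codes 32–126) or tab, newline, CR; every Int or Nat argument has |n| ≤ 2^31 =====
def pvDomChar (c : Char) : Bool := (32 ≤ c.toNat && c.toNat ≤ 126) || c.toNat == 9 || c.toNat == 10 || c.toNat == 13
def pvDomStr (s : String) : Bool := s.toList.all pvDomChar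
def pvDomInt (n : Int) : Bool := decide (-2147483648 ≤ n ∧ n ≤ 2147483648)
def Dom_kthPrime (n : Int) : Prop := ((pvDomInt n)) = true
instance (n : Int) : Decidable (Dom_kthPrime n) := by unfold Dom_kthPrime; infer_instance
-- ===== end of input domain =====

-- B replaces A's marking of every multiple of every i < n (plus a per-element counting loop) by a
-- sieve that runs divisors only up to sqrt(n), marks from i*i via slice assignment, and sums (faster).

-- ===== PORT A =====
-- the first two loops of A build the array `prime`; prime[j] = 1: every reached j lies in
-- [4, n) ⊆ [0, len prime), so `List.set j.toNat 1` is exact.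
def kthPrimeArr (n : Int) : Array Int :=
  (PySem.List.pyRange 2 n 1).foldl
    (fun a i => (PySem.List.pyRange (2 * i) n i).foldl (fun a j => a.setIfInBounds j.toNat 1) a)
    (Array.replicate (n + 1).toNat (0 : Int))

-- the counting loop; prime[i] is always read in range there, so `Array.getD … 0` is exact.
def kthPrime (n : Int) : Int :=
  let prime := kthPrimeArr n
  (PySem.List.pyRange 1 n 1).foldl
    (fun c i => if prime.getD i.toNat 0 != 0 then c + 1 else c) 0

-- ===== PORT B =====
-- the `while i * i < n` loop of Source B; the slice assignment comp[i*i::i] = [1]*… is written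
-- element-wise (every written index lies in [4, n) ⊆ [0, len comp), so `List.set j.toNat 1` is
-- exact). The `2 ≤ i` conjunct only makes the recursion total; every actual call has i ≥ 2.
def sieveStep (n : Int) (comp : Array Int) (i : Int) : Array Int :=
  if h : 2 ≤ i ∧ i * i < n then
    sieveStep n ((PySem.List.pyRange (i * i) n i).foldl
      (fun a j => a.setIfInBounds j.toNat 1) comp) (i + 1)
  else comp
termination_by (n - i).toNat
decreasing_by
  have h2 : 2 * i ≤ i * i := by nlinarith [h.1]
  omega

def kthPrime_alt (n : Int) : Int :=
  if n ≤ 0 then 0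
  else (sieveStep n (Array.replicate n.toNat (0 : Int)) 2).sum

-- ===== PRECONDITION & SPEC =====
def Spec_kthPrime (n : Int) (out : Int) : Prop := out = kthPrime_alt n
instance (n : Int) (out : Int) : Decidable (Spec_kthPrime n out) := by unfold Spec_kthPrime; infer_instance

-- ===== CLAIM (what is proved, stated in full; the proofs are below) =====
def Claim_equal_kthPrime : Prop := ∀ (n : Int), Dom_kthPrime n → Spec_kthPrime n (kthPrime n)

-- ===== LEMMAS AND PROOFS =====

-- a position both sieves mark: a product of two factors ≥ 2
def MarkPos (x : Int) : Prop := ∃ i m : Int, 2 ≤ i ∧ 2 ≤ m ∧ i * m = x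

-- what the B sieve, run from divisor i upwards, marks at position k
def MarkB (n i : Int) (k : Nat) : Prop :=
  ∃ d : Int, i ≤ d ∧ d * d ≤ (k : Int) ∧ (k : Int) < n ∧ d ∣ (k : Int)

-- the Bool predicate both counts reduce to
def compositeB (k : Nat) : Bool := decide (2 ≤ k ∧ ¬ Nat.Prime k)

-- list model of the B sieve loop (proof helper; the port itself works on Array)
def sieveStepL (n : Int) (comp : List Int) (i : Int) : List Int :=
  if h : 2 ≤ i ∧ i * i < n then
    sieveStepL n ((PySem.List.pyRange (i * i) n i).foldl (fun a j => a.set j.toNat 1) comp) (i + 1)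
  else comp
termination_by (n - i).toNat
decreasing_by
  have h2 : 2 * i ≤ i * i := by nlinarith [h.1]
  omega

-- ---------- Array ↔ List bridges ----------

lemma array_getD_toList (a : Array Int) (k : Nat) (d : Int) :
    a.getD k d = a.toList.getD k d := by
  unfold Array.getD
  split
  · next h => simp [List.getD_eq_getElem?_getD, h]
  · next h =>
    simp [List.getD_eq_getElem?_getD,
      List.getElem?_eq_none (by simpa using Nat.le_of_not_lt h)]

lemma foldl_set_toList (L : List Int) (a : Array Int) :
    (L.foldl (fun a j => a.setIfInBounds j.toNat (1 : Int)) a).toList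
      = L.foldl (fun l j => l.set j.toNat 1) a.toList := by
  induction L generalizing a with
  | nil => rfl
  | cons p L ih => simp [List.foldl_cons, ih, Array.toList_setIfInBounds]

lemma foldl_foldl_set_toList (M : List Int) (g : Int → List Int) (a : Array Int) :
    (M.foldl (fun a i => (g i).foldl (fun a j => a.setIfInBounds j.toNat (1 : Int)) a) a).toList
      = M.foldl (fun l i => (g i).foldl (fun l j => l.set j.toNat 1) l) a.toList := by
  induction M generalizing a with
  | nil => rfl
  | cons m M ih => simp [List.foldl_cons, ih, foldl_set_toList]

lemma kthPrimeArr_toList (n : Int) :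
    (kthPrimeArr n).toList =
      (PySem.List.pyRange 2 n 1).foldl
        (fun l i => (PySem.List.pyRange (2 * i) n i).foldl (fun l j => l.set j.toNat 1) l)
        (List.replicate (n + 1).toNat (0 : Int)) := by
  unfold kthPrimeArr
  rw [foldl_foldl_set_toList, Array.toList_replicate]

lemma sieveStep_toList (n i : Int) (a : Array Int) :
    (sieveStep n a i).toList = sieveStepL n a.toList i := by
  fun_induction sieveStep n a i with
  | case1 a i h ih =>
    conv_rhs => rw [sieveStepL]
    rw [dif_pos h, ih, foldl_set_toList]
  | case2 a i h =>
    conv_rhs => rw [sieveStepL]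
    rw [dif_neg h]

-- value at k after a fold of writes of 1 at the positions in L
lemma foldl_set_get (L : List Int) (a : List Int) (k : Nat) :
    (L.foldl (fun a j => a.set j.toNat (1 : Int)) a)[k]? =
      if (∃ j ∈ L, j.toNat = k) ∧ k < a.length then some 1 else a[k]? := by
  induction L generalizing a with
  | nil => simp
  | cons p L ih =>
    simp only [List.foldl_cons]
    rw [ih]
    simp only [List.length_set, List.getElem?_set, List.mem_cons]
    by_cases hk : k < a.length
    · by_cases hrest : ∃ j ∈ L, j.toNat = k
      · have h1 : (∃ j, (j = p ∨ j ∈ L) ∧ j.toNat = k) := by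
          obtain ⟨j, hj, hjk⟩ := hrest; exact ⟨j, Or.inr hj, hjk⟩
        simp [hrest, hk, h1]
      · by_cases hp : p.toNat = k
        · have h1 : (∃ j, (j = p ∨ j ∈ L) ∧ j.toNat = k) := ⟨p, Or.inl rfl, hp⟩
          simp [hrest, hk, hp, h1]
        · have h1 : ¬ (∃ j, (j = p ∨ j ∈ L) ∧ j.toNat = k) := by
            rintro ⟨j, hj, hjk⟩
            rcases hj with rfl | hj
            · exact hp hjk
            · exact hrest ⟨j, hj, hjk⟩
          simp [hrest, hk, hp, h1]
    · simp [hk]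
      omega

lemma foldl_set_length (L : List Int) (a : List Int) :
    (L.foldl (fun a j => a.set j.toNat (1 : Int)) a).length = a.length := by
  induction L generalizing a with
  | nil => rfl
  | cons p L ih => simp [List.foldl_cons, ih]

-- ---------- A side: the array built by the first two loops ----------

lemma kthPrimeArr_mem_iff (n : Int) (k : Nat) :
    (∃ j ∈ (PySem.List.pyRange 2 n 1).flatMap (fun i => PySem.List.pyRange (2 * i) n i),
        j.toNat = k) ↔ ((k : Int) < n ∧ MarkPos k) := by
  constructor
  · rintro ⟨j, hj, rfl⟩
    rw [List.mem_flatMap] at hj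
    obtain ⟨i, hi, hji⟩ := hj
    rw [PySem.List.mem_pyRange_one] at hi
    have hipos : (0 : Int) < i := by omega
    rw [PySem.List.mem_pyRange_iff_of_pos hipos] at hji
    obtain ⟨h1, h2, c, hc⟩ := hji
    have hj0 : (0 : Int) ≤ j := by omega
    have hc0 : 0 ≤ c := by nlinarith [hi.1]
    rw [Int.toNat_of_nonneg hj0]
    exact ⟨h2, i, 2 + c, hi.1, by omega, by linarith [hc]⟩
  · rintro ⟨hkn, i, m, hi, hm, him⟩
    have hk0 : (0 : Int) ≤ (k : Int) := Int.natCast_nonneg k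
    refine ⟨(k : Int), ?_, by omega⟩
    rw [List.mem_flatMap]
    have hin : i < n := by nlinarith
    refine ⟨i, by rw [PySem.List.mem_pyRange_one]; omega, ?_⟩
    rw [PySem.List.mem_pyRange_iff_of_pos (by omega : (0:Int) < i)]
    exact ⟨by nlinarith, hkn, ⟨m - 2, by rw [← him]; ring⟩⟩

lemma kthPrimeArr_get_mark (n : Int) (k : Nat) (hk : k < (n + 1).toNat)
    (h : (k : Int) < n ∧ MarkPos k) : (kthPrimeArr n).toList[k]? = some 1 := by
  rw [kthPrimeArr_toList, ← List.foldl_flatMap, foldl_set_get]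
  have hm := (kthPrimeArr_mem_iff n k).mpr h
  have hlen : k < (List.replicate (n + 1).toNat (0 : Int)).length := by simpa using hk
  rw [if_pos ⟨hm, hlen⟩]

lemma kthPrimeArr_get_unmark (n : Int) (k : Nat) (hk : k < (n + 1).toNat)
    (h : ¬ ((k : Int) < n ∧ MarkPos k)) : (kthPrimeArr n).toList[k]? = some 0 := by
  rw [kthPrimeArr_toList, ← List.foldl_flatMap, foldl_set_get]
  have hmem : ¬ (∃ j ∈ (PySem.List.pyRange 2 n 1).flatMap
      (fun i => PySem.List.pyRange (2 * i) n i), j.toNat = k) := fun hc =>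
    h ((kthPrimeArr_mem_iff n k).mp hc)
  rw [if_neg (by rintro ⟨hj, -⟩; exact hmem hj)]
  simp [hk]

-- ---------- B side: the sieve loop ----------

lemma sieveStepL_length (n i : Int) (a : List Int) : (sieveStepL n a i).length = a.length := by
  fun_induction sieveStepL n a i with
  | case1 a i h ih => rw [ih, foldl_set_length]
  | case2 a i h => rfl

lemma markB_step (n i : Int) (k : Nat) :
    MarkB n i k ↔ (MarkB n (i + 1) k ∨
      (i * i ≤ (k : Int) ∧ (k : Int) < n ∧ i ∣ (k : Int))) := by
  constructor
  · rintro ⟨d, hd, h1, h2, h3⟩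
    rcases eq_or_lt_of_le hd with rfl | hlt
    · exact Or.inr ⟨h1, h2, h3⟩
    · exact Or.inl ⟨d, by omega, h1, h2, h3⟩
  · rintro (⟨d, hd, h1, h2, h3⟩ | ⟨h1, h2, h3⟩)
    · exact ⟨d, by omega, h1, h2, h3⟩
    · exact ⟨i, le_refl i, h1, h2, h3⟩

lemma sieveStepL_vals (n i : Int) (a : List Int) (k : Nat) :
    (a[k]? = some 0 ∨ a[k]? = some 1) →
    ((sieveStepL n a i)[k]? = some 0 ∨ (sieveStepL n a i)[k]? = some 1) := by
  fun_induction sieveStepL n a i with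
  | case1 a i h ih =>
    intro ha
    apply ih
    rw [foldl_set_get]
    split_ifs with hc
    · exact Or.inr rfl
    · exact ha
  | case2 a i h => exact id

lemma sieveStepL_one_iff (n : Int) (i : Int) (a : List Int) (k : Nat) :
    2 ≤ i → k < a.length → (a[k]? = some 0 ∨ a[k]? = some 1) →
    ((sieveStepL n a i)[k]? = some 1 ↔ (MarkB n i k ∨ a[k]? = some 1)) := by
  fun_induction sieveStepL n a i with
  | case1 a i h ih =>
    intro hi hk ha
    have hQ : (∃ j ∈ PySem.List.pyRange (i * i) n i, j.toNat = k) ↔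
        (i * i ≤ (k : Int) ∧ (k : Int) < n ∧ i ∣ (k : Int)) := by
      constructor
      · rintro ⟨j, hj, rfl⟩
        rw [PySem.List.mem_pyRange_iff_of_pos (by omega : (0:Int) < i)] at hj
        obtain ⟨h1, h2, h3⟩ := hj
        have hj0 : (0 : Int) ≤ j := by nlinarith
        rw [Int.toNat_of_nonneg hj0]
        refine ⟨h1, h2, ?_⟩
        obtain ⟨c, hc⟩ := h3
        exact ⟨i + c, by linarith [hc]⟩
      · rintro ⟨h1, h2, h3⟩
        refine ⟨(k : Int), ?_, Int.toNat_natCast k⟩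
        rw [PySem.List.mem_pyRange_iff_of_pos (by omega : (0:Int) < i)]
        obtain ⟨c, hc⟩ := h3
        exact ⟨h1, h2, ⟨c - i, by rw [hc]; ring⟩⟩
    set a' := (PySem.List.pyRange (i * i) n i).foldl (fun a j => a.set j.toNat 1) a with ha'
    have hget : a'[k]? = if (∃ j ∈ PySem.List.pyRange (i * i) n i, j.toNat = k) ∧ k < a.length
        then some 1 else a[k]? := foldl_set_get _ _ _
    have hk' : k < a'.length := by rw [ha', foldl_set_length]; exact hk
    have ha'' : a'[k]? = some 0 ∨ a'[k]? = some 1 := by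
      rw [hget]; split_ifs with hc
      · exact Or.inr rfl
      · exact ha
    rw [ih (by omega) hk' ha'']
    rw [markB_step n i k]
    constructor
    · rintro (hm | h1)
      · exact Or.inl (Or.inl hm)
      · rw [hget] at h1
        by_cases hc : (∃ j ∈ PySem.List.pyRange (i * i) n i, j.toNat = k) ∧ k < a.length
        · exact Or.inl (Or.inr (hQ.mp hc.1))
        · rw [if_neg hc] at h1; exact Or.inr h1
    · rintro ((hm | hqi) | h1)
      · exact Or.inl hm
      · refine Or.inr ?_
        rw [hget, if_pos ⟨hQ.mpr hqi, hk⟩]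
      · refine Or.inr ?_
        rw [hget]; split_ifs with hc
        · rfl
        · exact h1
  | case2 a i h =>
    intro hi hk ha
    have hnm : ¬ MarkB n i k := by
      rintro ⟨d, hd, h1, h2, -⟩
      have hii : ¬ (i * i < n) := fun hc => h ⟨hi, hc⟩
      have : i * i ≤ d * d := by nlinarith
      omega
    constructor
    · intro h1; exact Or.inr h1
    · rintro (hm | h1)
      · exact absurd hm hnm
      · exact h1

-- ---------- the common characterisation: composite numbers ----------

lemma markPos_iff_nat (k : Nat) : MarkPos (k : Int) ↔ (2 ≤ k ∧ ¬ Nat.Prime k) := by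
  constructor
  · rintro ⟨i, m, hi, hm, him⟩
    have hik : i.toNat * m.toNat = k := by
      have : ((i.toNat * m.toNat : Nat) : Int) = (k : Int) := by
        push_cast [Int.toNat_of_nonneg (by omega : (0:Int) ≤ i),
          Int.toNat_of_nonneg (by omega : (0:Int) ≤ m)]
        exact him
      exact_mod_cast this
    have hi2 : 2 ≤ i.toNat := by omega
    have hm2 : 2 ≤ m.toNat := by omega
    constructor
    · calc 2 ≤ i.toNat := hi2
        _ ≤ i.toNat * m.toNat := Nat.le_mul_of_pos_right _ (by omega)
        _ = k := hik
    · intro hp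
      rcases (Nat.Prime.eq_one_or_self_of_dvd hp i.toNat ⟨m.toNat, hik.symm⟩) with h1 | h1
      · omega
      · have : m.toNat = 1 := by
          have hkpos : 0 < k := by omega
          have := hik
          rw [h1] at this
          nlinarith
        omega
  · rintro ⟨h2, hnp⟩
    obtain ⟨m, hmdvd, hm2, hmlt⟩ := Nat.exists_dvd_of_not_prime2 h2 hnp
    obtain ⟨c, hc⟩ := hmdvd
    have hc2 : 2 ≤ c := by
      rcases Nat.lt_or_ge c 2 with h | h
      · interval_cases c <;> omega
      · exact h
    exact ⟨(m : Int), (c : Int), by exact_mod_cast hm2, by exact_mod_cast hc2,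
      by exact_mod_cast hc.symm⟩

-- B's "has a divisor d with d² ≤ k" is exactly "is a product of two factors ≥ 2"
lemma markB_iff (n : Int) (k : Nat) :
    MarkB n 2 k ↔ ((k : Int) < n ∧ MarkPos (k : Int)) := by
  constructor
  · rintro ⟨d, hd, h1, h2, c, hc⟩
    refine ⟨h2, d, c, hd, ?_, hc.symm⟩
    have hdpos : (0 : Int) < d := by omega
    nlinarith
  · rintro ⟨hkn, i, m, hi, hm, him⟩
    rcases le_total i m with h | h
    · exact ⟨i, hi, by nlinarith, hkn, ⟨m, him.symm⟩⟩
    · exact ⟨m, hm, by nlinarith, hkn, ⟨i, by rw [← him]; ring⟩⟩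

-- ---------- counting ----------

lemma kthPrime_eq_countP (n : Int) :
    kthPrime n = ((List.range (n - 1).toNat).countP (fun k => compositeB (1 + k)) : Int) := by
  show (PySem.List.pyRange 1 n 1).foldl
    (fun c i => if (kthPrimeArr n).getD i.toNat 0 != 0 then c + 1 else c) 0 = _
  rw [PySem.List.foldl_count_if (fun i => (kthPrimeArr n).getD i.toNat 0 != 0)
    (PySem.List.pyRange 1 n 1) 0]
  rw [PySem.List.pyRange_one, List.countP_map, zero_add]
  congr 1
  apply List.countP_congr
  intro k hk
  rw [List.mem_range] at hk
  have hx0 : (0 : Int) ≤ 1 + (k : Int) := by omega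
  have hxn : (1 : Int) + (k : Int) < n := by omega
  have htn : (1 + (k : Int)).toNat = 1 + k := by omega
  have hlt : 1 + k < (n + 1).toNat := by omega
  simp only [Function.comp]
  rw [array_getD_toList, htn]
  by_cases hM : MarkPos ((1 + k : Nat) : Int)
  · have h1 : (kthPrimeArr n).toList[1 + k]? = some 1 := by
      apply kthPrimeArr_get_mark n (1 + k) hlt
      exact ⟨by push_cast; omega, hM⟩
    rw [List.getD_eq_getElem?_getD, h1]
    have h2 : compositeB (1 + k) = true := by
      unfold compositeB
      exact decide_eq_true ((markPos_iff_nat (1 + k)).mp hM)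
    simp [h2]
  · have h1 : (kthPrimeArr n).toList[1 + k]? = some 0 := by
      apply kthPrimeArr_get_unmark n (1 + k) hlt
      rintro ⟨-, hm⟩; exact hM hm
    rw [List.getD_eq_getElem?_getD, h1]
    have h2 : compositeB (1 + k) = false := by
      unfold compositeB
      apply decide_eq_false
      intro hc
      exact hM ((markPos_iff_nat (1 + k)).mpr hc)
    simp [h2]

lemma kthPrime_alt_eq_countP (n : Int) (hn : 0 < n) :
    kthPrime_alt n = ((List.range n.toNat).countP compositeB : Int) := by
  unfold kthPrime_alt
  rw [if_neg (by omega), ← Array.sum_toList, sieveStep_toList, Array.toList_replicate]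
  have hcomp : sieveStepL n (List.replicate n.toNat (0 : Int)) 2 =
      (List.range n.toNat).map (fun k => if compositeB k then (1 : Int) else 0) := by
    apply List.ext_getElem?
    intro k
    by_cases hk : k < n.toNat
    · have hk0 : (List.replicate n.toNat (0 : Int))[k]? = some 0 := by
        simp [hk]
      have hvals := sieveStepL_vals n 2 (List.replicate n.toNat (0 : Int)) k (Or.inl hk0)
      have hiff := sieveStepL_one_iff n 2 (List.replicate n.toNat (0 : Int)) k (le_refl 2)
        (by simpa using hk) (Or.inl hk0)
      have hrhs : ((List.range n.toNat).map
          (fun k => if compositeB k then (1 : Int) else 0))[k]? =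
          some (if compositeB k then (1 : Int) else 0) := by
        simp [List.getElem?_map, List.getElem?_range hk]
      rw [hrhs]
      by_cases hc : compositeB k = true
      · have hmp : MarkPos (k : Int) := (markPos_iff_nat k).mpr (of_decide_eq_true hc)
        have hmb : MarkB n 2 k := (markB_iff n k).mpr ⟨by omega, hmp⟩
        rw [hiff.mpr (Or.inl hmb), if_pos hc]
      · have hnot : (sieveStepL n (List.replicate n.toNat (0 : Int)) 2)[k]? ≠ some 1 := by
          intro h1
          rcases hiff.mp h1 with hmb | h0
          · have := (markB_iff n k).mp hmb
            exact hc (decide_eq_true ((markPos_iff_nat k).mp this.2))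
          · rw [hk0] at h0; exact absurd h0 (by decide)
        rcases hvals with h0 | h1
        · rw [h0, if_neg (by simpa using hc)]
        · exact absurd h1 hnot
    · have h1 : (sieveStepL n (List.replicate n.toNat (0 : Int)) 2)[k]? = none := by
        apply List.getElem?_eq_none
        rw [sieveStepL_length]; simpa using hk
      have h2 : ((List.range n.toNat).map
          (fun k => if compositeB k then (1 : Int) else 0))[k]? = none := by
        apply List.getElem?_eq_none; simpa using hk
      rw [h1, h2]
  rw [hcomp, PySem.List.sum_map_ite_one_zero compositeB]

lemma countP_shift (n : Int) (hn : 0 < n) :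
    (List.range (n - 1).toNat).countP (fun k => compositeB (1 + k)) =
      (List.range n.toNat).countP compositeB := by
  have hsucc : n.toNat = (n - 1).toNat + 1 := by omega
  rw [hsucc, List.range_succ_eq_map, List.countP_cons, List.countP_map]
  have h0 : compositeB 0 = false := by decide
  rw [h0]
  simp only [Bool.false_eq_true, if_false, add_zero]
  apply List.countP_congr
  intro x hx
  simp [Function.comp, Nat.succ_eq_add_one, Nat.add_comm]

-- ===== VERDICT (by name: the statement is the Claim_ definition above) =====
theorem kthPrime_spec : Claim_equal_kthPrime := by
  intro n _
  unfold Spec_kthPrime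
  by_cases hn : n ≤ 0
  · have hA : kthPrime n = 0 := by
      unfold kthPrime
      rw [PySem.List.pyRange_one_eq_nil (by omega)]
      rfl
    have hB : kthPrime_alt n = 0 := by
      unfold kthPrime_alt
      rw [if_pos hn]
    rw [hA, hB]
  · have hn' : 0 < n := by omega
    rw [kthPrime_eq_countP n, kthPrime_alt_eq_countP n hn', countP_shift n hn']
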